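-- pv_equiv track=rewrite | github.com/cirosantilli/project-euler-solvers | solvers/630.py | calc_M_and_S
-- ===== SOURCE A (Python) =====
-- from math import gcd
--
-- B_BITS = 12
--
-- D_BITS = 23
--
-- B_OFFSET = 1999  # B in [-1999, 1999] -> [0, 3998]
--
-- D_OFFSET = 4_000_000  # D in about [-4e6, 4e6] -> [0, 8e6]
--
-- def _line_code(p1, p2):
--     """
--     Build a packed integer representing the unique line through p1 and p2.
--
--     Line representation:
--       - Reduce direction (dx,dy) by gcd to make it primitive.
--       - Use primitive normal (A,B) = (dy, -dx), flip sign so that: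
--             A > 0  OR  (A == 0 AND B > 0)
--       - Offset D = A*x + B*y
--
--     Returns None if points are identical.
--     """
--     x1, y1 = p1
--     x2, y2 = p2
--
--     dx = x2 - x1
--     dy = y2 - y1
--     if dx == 0 and dy == 0:
--         return None
--
--     g = gcd(abs(dx), abs(dy))
--     dx //= g
--     dy //= g
--
--     # Primitive normal to the direction
--     A = dy
--     B = -dx
--
--     # Fix sign to make (A,B) canonical
--     if A < 0 or (A == 0 and B < 0):
--         A = -A
--         B = -B
--
--     normal_id = (A << B_BITS) | (B + B_OFFSET)
--     D = A * x1 + B * y1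
--     return (normal_id << D_BITS) | (D + D_OFFSET)
--
-- def calc_M_and_S(points):
--     """
--     Given a list of points, return (M, S) for the set of unique lines formed.
--
--     We:
--       1) Generate a packed code for each point pair.
--       2) Sort all codes.
--       3) Scan to count unique lines (M) and sizes of parallel classes (c).
--     """
--     n = len(points)
--     codes = []
--     append = codes.append
--     for i in range(n - 1):
--         pi = points[i]
--         for j in range(i + 1, n):
--             code = _line_code(pi, points[j])
--             if code is not None:
--                 append(code)
--
--     codes.sort()
--
--     M = 0
--     sum_parallel_pairs_x2 = 0  # will accumulate sum c*(c-1)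
--     prev_code = None
--     prev_normal = None
--     c = 0
--
--     for code in codes:
--         if code == prev_code:
--             continue  # duplicate line from a different point pair
--
--         M += 1
--         normal = code >> D_BITS
--
--         if normal != prev_normal:
--             if prev_normal is not None:
--                 sum_parallel_pairs_x2 += c * (c - 1)
--             prev_normal = normal
--             c = 1
--         else:
--             c += 1
--
--         prev_code = code
--
--     if prev_normal is not None:
--         sum_parallel_pairs_x2 += c * (c - 1)
--
--     S = M * (M - 1) - sum_parallel_pairs_x2
--     return M, S
-- ===== SOURCE B (Python) =====
-- from math import gcd
--
-- B_BITS = 12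
-- D_BITS = 23
-- B_OFFSET = 1999
-- D_OFFSET = 4_000_000
--
-- def _line_code(p1, p2):
--     x1, y1 = p1
--     x2, y2 = p2
--     dx = x2 - x1
--     dy = y2 - y1
--     if dx == 0 and dy == 0:
--         return None
--     g = gcd(abs(dx), abs(dy))
--     dx //= g
--     dy //= g
--     A = dy
--     B = -dx
--     if A < 0 or (A == 0 and B < 0):
--         A = -A
--         B = -B
--     normal_id = (A << B_BITS) | (B + B_OFFSET)
--     D = A * x1 + B * y1
--     return (normal_id << D_BITS) | (D + D_OFFSET)
--
-- def calc_M_and_S(points):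
--     """Group the distinct line codes by their normal in one dict of sets;
--     then M = total number of distinct lines and, with c the class sizes,
--     S = M*M - sum(c^2) (closed form of M*(M-1) - sum c*(c-1)).
--     No sort, no sentinel scan."""
--     n = len(points)
--     groups = {}
--     for i in range(n - 1):
--         pi = points[i]
--         for j in range(i + 1, n):
--             code = _line_code(pi, points[j])
--             if code is not None:
--                 groups.setdefault(code >> D_BITS, set()).add(code)
--     M = 0
--     sumsq = 0
--     for lines in groups.values():
--         c = len(lines)
--         M += c
--         sumsq += c * c
--     return M, M * M - sumsq
-- ===== Notes on version B (the rewrite author's own statement) =====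
-- stated objective: simpler
-- what changed: Instead of collecting all pair codes into a list, sorting it and scanning with prev_code/prev_normal sentinels and a running c*(c-1) accumulator, B groups the distinct codes by normal in a single dict of sets while generating the pairs, then computes M as the sum of the class sizes and S by the closed form M*M - sum(c^2).
import Mathlib
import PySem

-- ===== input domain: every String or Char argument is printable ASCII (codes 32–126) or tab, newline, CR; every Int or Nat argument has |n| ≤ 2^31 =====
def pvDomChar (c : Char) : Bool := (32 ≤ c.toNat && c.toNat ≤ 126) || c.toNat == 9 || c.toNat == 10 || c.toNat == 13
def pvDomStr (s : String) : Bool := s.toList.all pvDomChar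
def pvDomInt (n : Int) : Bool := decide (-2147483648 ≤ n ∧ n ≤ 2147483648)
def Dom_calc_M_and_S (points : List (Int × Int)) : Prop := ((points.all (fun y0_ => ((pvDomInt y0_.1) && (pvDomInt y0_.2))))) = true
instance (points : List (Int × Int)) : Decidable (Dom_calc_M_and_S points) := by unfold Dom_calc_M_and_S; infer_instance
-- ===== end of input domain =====

-- B replaces A's sort-then-sentinel-scan by one dict of code sets grouped by normal and the
-- closed form S = M*M - sum c^2; same return value (no mutation of the argument in either).

-- shared module constants and helper _line_code (used verbatim by both A and B)
def pvBBits : Nat := 12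
def pvDBits : Nat := 23
def pvBOffset : Int := 1999
def pvDOffset : Int := 4000000

def pvLineCode (p1 p2 : Int × Int) : Option Int :=
  let x1 := p1.1; let y1 := p1.2
  let x2 := p2.1; let y2 := p2.2
  let dx := x2 - x1
  let dy := y2 - y1
  if dx = 0 ∧ dy = 0 then none
  else
    let g : Int := (Nat.gcd dx.natAbs dy.natAbs : Int)
    let dx := PySem.Int.floordiv dx g
    let dy := PySem.Int.floordiv dy g
    let A := dy
    let B := -dx
    let AB := if A < 0 ∨ (A = 0 ∧ B < 0) then (-A, -B) else (A, B)
    let normalId := PySem.Int.bor (AB.1 <<< pvBBits) (AB.2 + pvBOffset)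
    let D := AB.1 * x1 + AB.2 * y1
    some (PySem.Int.bor (normalId <<< pvDBits) (D + pvDOffset))

-- ===== PORT A =====
-- the scan loop body of A (state: M, acc = sum_parallel_pairs_x2, prev_code, prev_normal, c)
def pvScanStep (st : Int × Int × Option Int × Option Int × Int) (code : Int) :
    Int × Int × Option Int × Option Int × Int :=
  let (M, acc, prevCode, prevNormal, c) := st
  if some code = prevCode then st
  else
    let M := M + 1
    let normal := code >>> pvDBits
    match prevNormal with
    | none => (M, acc, some code, some normal, 1)
    | some pn =>
      if normal ≠ pn then (M, acc + c * (c - 1), some code, some normal, 1)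
      else (M, acc, some code, some pn, c + 1)

def calc_M_and_S (points : List (Int × Int)) : Int × Int :=
  let n : Int := points.length
  let codes : List Int :=
    (PySem.List.pyRange 0 (n - 1) 1).foldl (fun codes i =>
      let pi := PySem.List.pyGetD points i (0, 0)
      (PySem.List.pyRange (i + 1) n 1).foldl (fun codes j =>
        match pvLineCode pi (PySem.List.pyGetD points j (0, 0)) with
        | none => codes
        | some c => codes ++ [c]) codes) []
  let codes := PySem.List.sorted codes (fun x => x) false
  let st := codes.foldl pvScanStep (0, 0, none, none, 0)
  let (M, acc, _, prevNormal, c) := st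
  let acc := match prevNormal with
    | some _ => acc + c * (c - 1)
    | none => acc
  (M, M * (M - 1) - acc)

-- ===== PORT B =====
def calc_M_and_S_alt (points : List (Int × Int)) : Int × Int :=
  let n : Int := points.length
  let groups : PySem.Dict Int (PySem.Set Int) :=
    (PySem.List.pyRange 0 (n - 1) 1).foldl (fun d i =>
      let pi := PySem.List.pyGetD points i (0, 0)
      (PySem.List.pyRange (i + 1) n 1).foldl (fun d j =>
        match pvLineCode pi (PySem.List.pyGetD points j (0, 0)) with
        | none => d
        | some c => d.modify (c >>> pvDBits) PySem.Set.empty (fun s => PySem.Set.add s c)) d)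
      PySem.Dict.empty
  let ms := groups.values.foldl (fun (p : Int × Int) lines =>
      let c : Int := PySem.Set.len lines
      (p.1 + c, p.2 + c * c)) (0, 0)
  (ms.1, ms.1 * ms.1 - ms.2)

-- ===== PRECONDITION & SPEC =====
def Spec_calc_M_and_S (points : List (Int × Int)) (out : Int × Int) : Prop := out = calc_M_and_S_alt points
instance (points : List (Int × Int)) (out : Int × Int) : Decidable (Spec_calc_M_and_S points out) := by unfold Spec_calc_M_and_S; infer_instance

-- ===== CLAIM (what is proved, stated in full; the proofs are below) =====
def Claim_equal_calc_M_and_S : Prop := ∀ (points : List (Int × Int)), Dom_calc_M_and_S points → Spec_calc_M_and_S points (calc_M_and_S points)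

-- ===== LEMMAS AND PROOFS =====
def pvKey (c : Int) : Int := c >>> pvDBits

theorem pvKey_mono {x y : Int} (h : x ≤ y) : pvKey x ≤ pvKey y := by
  simp only [pvKey, Int.shiftRight_eq_div_pow]
  exact Int.ediv_le_ediv (by positivity) h

theorem pvFoldOptAppend (f : Int → Option Int) (l : List Int) (acc : List Int) :
    l.foldl (fun a j => match f j with | none => a | some c => a ++ [c]) acc
      = acc ++ l.filterMap f := by
  induction l generalizing acc with
  | nil => simp
  | cons x xs ih => cases h : f x <;> simp [h, ih, List.filterMap_cons]

theorem pvFoldOptStep {β : Type} (f : Int → Option Int) (step : β → Int → β) (l : List Int) (d : β) :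
    l.foldl (fun d j => match f j with | none => d | some c => step d c) d
      = (l.filterMap f).foldl step d := by
  induction l generalizing d with
  | nil => rfl
  | cons x xs ih => cases h : f x <;> simp [h, ih, List.filterMap_cons]

theorem pvFoldlFlatMap {β : Type} (g : Int → List Int) (step : β → Int → β) (l : List Int) (d : β) :
    l.foldl (fun d i => (g i).foldl step d) d = (l.flatMap g).foldl step d := by
  induction l generalizing d with
  | nil => rfl
  | cons x xs ih => simp [List.flatMap_cons, List.foldl_append, ih]

def pvCodes (points : List (Int × Int)) : List Int :=
  (PySem.List.pyRange 0 ((points.length : Int) - 1) 1).flatMap (fun i =>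
    (PySem.List.pyRange (i + 1) (points.length : Int) 1).filterMap (fun j =>
      pvLineCode (PySem.List.pyGetD points i (0, 0)) (PySem.List.pyGetD points j (0, 0))))

def pvStepB (d : PySem.Dict Int (PySem.Set Int)) (c : Int) : PySem.Dict Int (PySem.Set Int) :=
  d.modify (pvKey c) PySem.Set.empty (fun s => PySem.Set.add s c)

-- the scan without the duplicate-skip branch and without the prev_code component
def pvScanStep2 (st : Int × Int × Option Int × Int) (code : Int) : Int × Int × Option Int × Int :=
  let (M, acc, prevNormal, c) := st
  let M := M + 1
  let normal := pvKey code
  match prevNormal with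
  | none => (M, acc, some normal, 1)
  | some pn =>
    if normal ≠ pn then (M, acc + c * (c - 1), some normal, 1)
    else (M, acc, some pn, c + 1)

def pvDD (p : Option Int) (l : List Int) : List Int :=
  match l with
  | [] => []
  | x :: xs => if some x = p then pvDD p xs else x :: pvDD (some x) xs

def pvProj (st : Int × Int × Option Int × Option Int × Int) : Int × Int × Option Int × Int :=
  (st.1, st.2.1, st.2.2.2.1, st.2.2.2.2)

theorem pvSkipElim (xs : List Int) : ∀ (M acc c : Int) (p pn : Option Int),
    pvProj (xs.foldl pvScanStep (M, acc, p, pn, c))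
      = (pvDD p xs).foldl pvScanStep2 (M, acc, pn, c) := by
  induction xs with
  | nil => intro M acc c p pn; rfl
  | cons x xs ih =>
    intro M acc c p pn
    by_cases h : some x = p
    · rw [List.foldl_cons, pvDD, if_pos h]
      have hstep : pvScanStep (M, acc, p, pn, c) x = (M, acc, p, pn, c) := by
        simp [pvScanStep, h]
      rw [hstep, ih]
    · rw [List.foldl_cons, pvDD, if_neg h, List.foldl_cons]
      have hstep2 : pvScanStep2 (M, acc, pn, c) x =
          pvProj (pvScanStep (M, acc, p, pn, c) x) := by
        cases pn <;> simp [pvScanStep, pvScanStep2, pvProj, h, pvKey] <;> split <;> simp_all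
      rw [hstep2]
      have : pvScanStep (M, acc, p, pn, c) x =
          ((pvScanStep (M, acc, p, pn, c) x).1, (pvScanStep (M, acc, p, pn, c) x).2.1,
            some x, (pvScanStep (M, acc, p, pn, c) x).2.2.2.1,
            (pvScanStep (M, acc, p, pn, c) x).2.2.2.2) := by
        cases pn <;> simp [pvScanStep, h] <;> split <;> simp
      rw [this, ih]
      rfl

theorem pvDD_spec (s : List Int) : ∀ (p : Option Int), s.Pairwise (· ≤ ·) →
    (∀ x ∈ s, ∀ v, p = some v → v ≤ x) →
    (pvDD p s).Pairwise (· < ·) ∧ (∀ y, y ∈ pvDD p s ↔ y ∈ s ∧ ∀ v, p = some v → v ≠ y) := by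
  induction s with
  | nil => intro p _ _; simp [pvDD]
  | cons x xs ih =>
    intro p hpw hp
    have hx : ∀ y ∈ xs, x ≤ y := fun y hy => List.rel_of_pairwise_cons hpw hy
    have hpw' := hpw.of_cons
    by_cases h : some x = p
    · obtain ⟨h1, h2⟩ := ih p hpw' (fun y hy v hv => by
        cases h; cases hv; exact le_trans (hp x (by simp) _ rfl) (hx y hy))
      rw [pvDD, if_pos h]
      refine ⟨h1, fun y => ?_⟩
      rw [h2]
      cases h
      constructor
      · rintro ⟨hy, hv⟩; exact ⟨List.mem_cons_of_mem _ hy, hv⟩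
      · rintro ⟨hy, hv⟩
        rcases List.mem_cons.mp hy with rfl | hy'
        · exact absurd rfl (hv _ rfl)
        · exact ⟨hy', hv⟩
    · obtain ⟨h1, h2⟩ := ih (some x) hpw' (fun y hy v hv => by cases hv; exact hx y hy)
      rw [pvDD, if_neg h]
      constructor
      · refine List.pairwise_cons.mpr ⟨fun y hy => ?_, h1⟩
        have hm := (h2 y).mp hy
        exact lt_of_le_of_ne (hx y hm.1) (hm.2 x rfl)
      · intro y
        simp only [List.mem_cons, h2]
        constructor
        · rintro (rfl | ⟨hy, hxy⟩)
          · refine ⟨Or.inl rfl, fun v hv heq => ?_⟩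
            subst heq
            exact h hv.symm
          · refine ⟨Or.inr hy, fun v hv heq => ?_⟩
            have hvx := hp x (by simp) v hv
            exact hxy x rfl (le_antisymm (hx y hy) (heq ▸ hvx))
        · rintro ⟨rfl | hy, hv⟩
          · exact Or.inl rfl
          · by_cases hxy : y = x
            · exact Or.inl hxy
            · refine Or.inr ⟨hy, fun v hveq => ?_⟩
              injection hveq with h'
              subst h'
              exact fun e => hxy e.symm

def pvG : List Int → Int → Int → Int
  | [], _, c => c * (c - 1)
  | x :: xs, n, c => if x = n then pvG xs n (c + 1) else c * (c - 1) + pvG xs x 1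

theorem pvScan2Run (U : List Int) : ∀ (M acc n c : Int), ∃ M' acc' n' c',
    U.foldl pvScanStep2 (M, acc, some n, c) = (M', acc', some n', c') ∧
    M' = M + U.length ∧ acc' + c' * (c' - 1) = acc + pvG (U.map pvKey) n c := by
  induction U with
  | nil =>
    intro M acc n c
    exact ⟨M, acc, n, c, rfl, by simp, by simp [pvG]⟩
  | cons x xs ih =>
    intro M acc n c
    by_cases h : pvKey x = n
    · have hstep : pvScanStep2 (M, acc, some n, c) x = (M + 1, acc, some n, c + 1) := by
        simp [pvScanStep2, h]
      obtain ⟨M', acc', n', c', he, hM, hacc⟩ := ih (M + 1) acc n (c + 1)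
      exact ⟨M', acc', n', c', by rw [List.foldl_cons, hstep, he], by simp [hM]; push_cast; ring,
        by rw [hacc]; simp [pvG, h]⟩
    · have hstep : pvScanStep2 (M, acc, some n, c) x
          = (M + 1, acc + c * (c - 1), some (pvKey x), 1) := by
        simp [pvScanStep2, h]
      obtain ⟨M', acc', n', c', he, hM, hacc⟩ := ih (M + 1) (acc + c * (c - 1)) (pvKey x) 1
      exact ⟨M', acc', n', c', by rw [List.foldl_cons, hstep, he], by simp [hM]; push_cast; ring,
        by rw [hacc]; simp [pvG, h]; ring⟩
def pvH : List Int → Int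
  | [] => 0
  | x :: xs => (1 + (xs.count x : Int)) * (xs.count x : Int) + pvH (xs.filter (fun y => y != x))
termination_by l => l.length
decreasing_by
  simpa [Nat.lt_succ_iff] using List.length_filter_le _ _

theorem pvG_eq (ks : List Int) : ∀ n c, ks.Pairwise (· ≤ ·) → (∀ x ∈ ks, n ≤ x) →
    pvG ks n c = (c + (ks.count n : Int)) * (c + (ks.count n : Int) - 1)
      + pvH (ks.filter (fun y => y != n)) := by
  induction ks with
  | nil => intro n c _ _; simp [pvG, pvH]
  | cons x ks ih =>
    intro n c hpw hge
    have hx : ∀ y ∈ ks, x ≤ y := fun y hy => List.rel_of_pairwise_cons hpw hy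
    by_cases h : x = n
    · subst h
      have := ih x (c + 1) hpw.of_cons (fun y hy => hx y hy)
      rw [pvG, if_pos rfl, this]
      have hcnt : (x :: ks).count x = ks.count x + 1 := by simp
      rw [hcnt]
      have hfil : (x :: ks).filter (fun y => y != x) = ks.filter (fun y => y != x) := by
        simp [List.filter_cons]
      rw [hfil]
      push_cast
      ring
    · have hnx : n < x := lt_of_le_of_ne (hge x (by simp)) (fun e => h e.symm)
      have := ih x 1 hpw.of_cons (fun y hy => hx y hy)
      rw [pvG, if_neg h, this]
      have hnot : n ∉ ks := fun hmem => absurd (hx n hmem) (not_le.mpr hnx)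
      have hcnt : (x :: ks).count n = 0 := by
        simp [List.count_cons, List.count_eq_zero.mpr hnot, h]
      have hfil : (x :: ks).filter (fun y => y != n) = x :: ks := by
        rw [List.filter_eq_self]
        intro a ha
        rcases List.mem_cons.mp ha with rfl | ha'
        · simpa using h
        · have hxa := lt_of_lt_of_le hnx (hx a ha')
          simp only [bne_iff_ne, ne_eq]
          omega
      rw [hcnt, hfil, pvH]
      ring

theorem pvH_eq_sum_aux (m : Nat) : ∀ ks : List Int, ks.length ≤ m →
    pvH ks = ∑ n ∈ ks.toFinset, ((ks.count n : Int) * ((ks.count n : Int) - 1)) := by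
  induction m with
  | zero =>
    intro ks hk
    rw [List.length_eq_zero_iff.mp (Nat.le_zero.mp hk)]
    simp [pvH]
  | succ m ihm =>
    intro ks hk
    match ks with
    | [] => simp [pvH]
    | x :: xs =>
    have ih := ihm (xs.filter (fun y => y != x))
      (le_trans (List.length_filter_le _ _) (Nat.le_of_succ_le_succ hk))
    rw [pvH]
    have hxmem : x ∈ (x :: xs).toFinset := by simp
    rw [← Finset.add_sum_erase _ _ hxmem]
    have hset : (x :: xs).toFinset.erase x = (xs.filter (fun y => y != x)).toFinset := by
      ext a
      simp only [Finset.mem_erase, List.mem_toFinset, List.mem_cons, List.mem_filter,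
        bne_iff_ne, ne_eq]
      constructor
      · rintro ⟨hne, rfl | ha⟩
        · exact absurd rfl hne
        · exact ⟨ha, hne⟩
      · rintro ⟨ha, hne⟩
        exact ⟨hne, Or.inr ha⟩
    have hcount : ∀ a ∈ (xs.filter (fun y => y != x)).toFinset,
        ((x :: xs).count a : Int) * (((x :: xs).count a : Int) - 1)
          = ((xs.filter (fun y => y != x)).count a : Int)
            * (((xs.filter (fun y => y != x)).count a : Int) - 1) := by
      intro a ha
      have hax : a ≠ x := by
        simp only [List.mem_toFinset, List.mem_filter, bne_iff_ne, ne_eq] at ha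
        exact ha.2
      have h1 : (x :: xs).count a = xs.count a := by
        simp [List.count_cons, hax, Ne.symm hax]
      have h2 : (xs.filter (fun y => y != x)).count a = xs.count a := by
        rw [List.count_filter]
        simp [hax]
      rw [h1, h2]
    rw [hset, Finset.sum_congr rfl hcount, ih]
    have hcx : ((x :: xs).count x : Int) = (xs.count x : Int) + 1 := by
      simp [List.count_cons]
    rw [hcx]
    ring

-- ===== B side =====

theorem pvGetD_stepB (L : List Int) : ∀ (d : PySem.Dict Int (PySem.Set Int)) (n : Int),
    (L.foldl pvStepB d).getD n PySem.Set.empty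
      = (L.filter (fun c => pvKey c == n)).foldl PySem.Set.add (d.getD n PySem.Set.empty) := by
  induction L with
  | nil => intro d n; rfl
  | cons c L ih =>
    intro d n
    rw [List.foldl_cons, ih, List.filter_cons]
    by_cases h : pvKey c = n
    · have heq : (pvStepB d c).getD n PySem.Set.empty
          = PySem.Set.add (d.getD n PySem.Set.empty) c := by
        rw [pvStepB, PySem.Dict.getD_modify]
        simp [h]
      simp only [PySem.Set.empty] at heq
      simp [h, heq]
    · have heq : (pvStepB d c).getD n PySem.Set.empty = d.getD n PySem.Set.empty := by
        rw [pvStepB, PySem.Dict.getD_modify]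
        simp [h, Ne.symm h]
      simp only [PySem.Set.empty] at heq
      simp [h, heq]
-- ===== assembled forms of the two tails, over an arbitrary code list =====

def pvA (L : List Int) : Int × Int :=
  let codes := PySem.List.sorted L (fun x => x) false
  let st := codes.foldl pvScanStep (0, 0, none, none, 0)
  let M := st.1
  let acc := match st.2.2.2.1 with
    | some _ => st.2.1 + st.2.2.2.2 * (st.2.2.2.2 - 1)
    | none => st.2.1
  (M, M * (M - 1) - acc)

def pvB (L : List Int) : Int × Int :=
  let groups := L.foldl pvStepB PySem.Dict.empty
  let ms := groups.values.foldl (fun (p : Int × Int) lines =>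
      (p.1 + PySem.Set.len lines, p.2 + PySem.Set.len lines * PySem.Set.len lines)) (0, 0)
  (ms.1, ms.1 * ms.1 - ms.2)

def pvHA (ks : List Int) : Int :=
  match ks with
  | [] => 0
  | x :: xs => pvG xs x 1

theorem pvHA_eq_pvH (ks : List Int) (h : ks.Pairwise (· ≤ ·)) : pvHA ks = pvH ks := by
  match ks with
  | [] => simp [pvHA, pvH]
  | x :: xs =>
    have hx : ∀ y ∈ xs, x ≤ y := fun y hy => List.rel_of_pairwise_cons h hy
    rw [pvHA, pvG_eq xs x 1 h.of_cons hx, pvH]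
    ring

theorem pvA_eval (L : List Int) :
    pvA L = (((pvDD none (PySem.List.sorted L (fun x => x) false)).length : Int),
      ((pvDD none (PySem.List.sorted L (fun x => x) false)).length : Int)
        * (((pvDD none (PySem.List.sorted L (fun x => x) false)).length : Int) - 1)
        - pvHA ((pvDD none (PySem.List.sorted L (fun x => x) false)).map pvKey)) := by
  have hskip := pvSkipElim (PySem.List.sorted L (fun x => x) false) 0 0 0 none none
  simp only [pvProj] at hskip
  unfold pvA
  match hU : pvDD none (PySem.List.sorted L (fun x => x) false) with
  | [] =>
    rw [hU] at hskip
    simp only [List.foldl_nil, Prod.mk.injEq] at hskip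
    obtain ⟨h1, h2, h3, h4⟩ := hskip
    simp only [h1, h2, h3, h4]
    simp [pvHA]
  | u :: U' =>
    rw [hU] at hskip
    rw [List.foldl_cons] at hskip
    have hfirst : pvScanStep2 (0, 0, none, 0) u = (1, 0, some (pvKey u), 1) := rfl
    rw [hfirst] at hskip
    obtain ⟨M', acc', n', c', he, hM, hacc⟩ := pvScan2Run U' 1 0 (pvKey u) 1
    rw [he] at hskip
    simp only [Prod.mk.injEq] at hskip
    obtain ⟨h1, h2, h3, h4⟩ := hskip
    simp only [h1, h2, h3, h4]
    rw [Prod.mk.injEq]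
    refine ⟨by rw [hM]; simp; ring, ?_⟩
    rw [hM, hacc]
    simp only [pvHA, List.map_cons, List.length_cons]
    push_cast
    ring

-- ===== B side characterization =====

theorem pvB_eval (L : List Int) :
    pvB L = (((PySem.List.dedup (L.map pvKey)).map (fun n =>
        ((PySem.Set.ofList (L.filter (fun c => pvKey c == n))).length : Int))).sum,
      ((PySem.List.dedup (L.map pvKey)).map (fun n =>
        ((PySem.Set.ofList (L.filter (fun c => pvKey c == n))).length : Int))).sum
      * ((PySem.List.dedup (L.map pvKey)).map (fun n =>
        ((PySem.Set.ofList (L.filter (fun c => pvKey c == n))).length : Int))).sum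
      - ((PySem.List.dedup (L.map pvKey)).map (fun n =>
        ((PySem.Set.ofList (L.filter (fun c => pvKey c == n))).length : Int)
        * ((PySem.Set.ofList (L.filter (fun c => pvKey c == n))).length : Int))).sum) := by
  unfold pvB
  dsimp only
  have hfn : ∀ (d : PySem.Dict Int (PySem.Set Int)) (c : Int),
      pvStepB d c = d.modify (pvKey c) PySem.Set.empty
        ((fun (_ : PySem.Dict Int (PySem.Set Int)) (c : Int) =>
          (fun s => PySem.Set.add s c)) d c) := fun _ _ => rfl
  have hkeys : (L.foldl pvStepB PySem.Dict.empty).keys = PySem.Set.ofList (L.map pvKey) := by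
    rw [PySem.List.foldl_congr_mem L pvStepB _ PySem.Dict.empty (fun d c _ => hfn d c),
      PySem.Dict.keys_foldl_modify_key, PySem.Dict.keys_empty]
    rfl
  have hnodup : (L.foldl pvStepB PySem.Dict.empty).keys.Nodup := by
    rw [hkeys]; exact PySem.Set.nodup_ofList _
  rw [PySem.Dict.values_eq_map_keys _ hnodup PySem.Set.empty, hkeys]
  have hgetD : ∀ n : Int, (L.foldl pvStepB PySem.Dict.empty).getD n PySem.Set.empty
      = PySem.Set.ofList (L.filter (fun c => pvKey c == n)) := by
    intro n
    rw [pvGetD_stepB, PySem.Dict.getD_empty]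
    rfl
  simp only [hgetD]
  rw [List.foldl_map, PySem.List.foldl_prod_mk
    (f := fun (a : Int) (n : Int) => a + PySem.Set.len (PySem.Set.ofList (L.filter (fun c => pvKey c == n))))
    (g := fun (a : Int) (n : Int) => a + PySem.Set.len (PySem.Set.ofList (L.filter (fun c => pvKey c == n)))
      * PySem.Set.len (PySem.Set.ofList (L.filter (fun c => pvKey c == n)))),
    PySem.List.foldl_add, PySem.List.foldl_add]
  simp [PySem.Set.len, PySem.List.dedup_eq_ofList]
theorem pvH_eq_sum (ks : List Int) :
    pvH ks = ∑ n ∈ ks.toFinset, ((ks.count n : Int) * ((ks.count n : Int) - 1)) :=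
  pvH_eq_sum_aux ks.length ks le_rfl

theorem pvClassLen (L : List Int) (n : Int) :
    ((PySem.Set.ofList (L.filter (fun c => pvKey c == n))).length : Int)
      = (((PySem.List.dedup L).map pvKey).count n : Int) := by
  have hperm : (PySem.Set.ofList (L.filter (fun c => pvKey c == n))).Perm
      ((PySem.List.dedup L).filter (fun c => pvKey c == n)) := by
    rw [List.perm_ext_iff_of_nodup (PySem.Set.nodup_ofList _)
      ((PySem.List.nodup_dedup L).filter _)]
    intro a
    rw [PySem.Set.mem_ofList, List.mem_filter, List.mem_filter, PySem.List.mem_dedup]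
  rw [hperm.length_eq]
  have : ((PySem.List.dedup L).map pvKey).count n
      = (PySem.List.dedup L).countP (fun c => pvKey c == n) := by
    rw [List.count, List.countP_map]
    rfl
  rw [this, List.countP_eq_length_filter]

theorem pvMain (L : List Int) : pvA L = pvB L := by
  rw [pvA_eval, pvB_eval]
  have hsp : (PySem.List.sorted L (fun x => x) false).Pairwise (· ≤ ·) := by
    simpa using PySem.List.sorted_pairwise L (fun x => x)
  obtain ⟨hpwU, hmemU⟩ := pvDD_spec (PySem.List.sorted L (fun x => x) false) none hsp
    (fun x _ v hv => by cases hv)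
  have hUnodup : (pvDD none (PySem.List.sorted L (fun x => x) false)).Nodup :=
    hpwU.imp ne_of_lt
  have hperm : (pvDD none (PySem.List.sorted L (fun x => x) false)).Perm
      (PySem.List.dedup L) := by
    rw [List.perm_ext_iff_of_nodup hUnodup (PySem.List.nodup_dedup L)]
    intro a
    rw [hmemU a, PySem.List.mem_dedup, PySem.List.mem_sorted]
    simp
  have hpermk : ((pvDD none (PySem.List.sorted L (fun x => x) false)).map pvKey).Perm
      ((PySem.List.dedup L).map pvKey) := hperm.map pvKey
  have hUk_pw : ((pvDD none (PySem.List.sorted L (fun x => x) false)).map pvKey).Pairwise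
      (· ≤ ·) := List.Pairwise.map pvKey (fun a b h => pvKey_mono (le_of_lt h)) hpwU
  -- name the common quantities
  set t : List Int := (PySem.List.dedup L).map pvKey with ht
  -- B's sums as Finset sums over t.toFinset
  have hNset : (PySem.List.dedup (L.map pvKey)).toFinset = t.toFinset := by
    ext a
    simp [List.mem_toFinset, PySem.List.mem_dedup, ht, List.mem_map]
  have hsum1 : ((PySem.List.dedup (L.map pvKey)).map (fun n =>
      ((PySem.Set.ofList (L.filter (fun c => pvKey c == n))).length : Int))).sum
      = ∑ n ∈ t.toFinset, ((t.count n : Int)) := by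
    rw [← List.sum_toFinset _ (PySem.List.nodup_dedup _), hNset]
    exact Finset.sum_congr rfl (fun n _ => pvClassLen L n)
  have hsum2 : ((PySem.List.dedup (L.map pvKey)).map (fun n =>
      ((PySem.Set.ofList (L.filter (fun c => pvKey c == n))).length : Int)
      * ((PySem.Set.ofList (L.filter (fun c => pvKey c == n))).length : Int))).sum
      = ∑ n ∈ t.toFinset, ((t.count n : Int) * (t.count n : Int)) := by
    rw [← List.sum_toFinset _ (PySem.List.nodup_dedup _), hNset]
    exact Finset.sum_congr rfl (fun n _ => by rw [pvClassLen L n])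
  -- the total count is the length
  have hM : ∑ n ∈ t.toFinset, ((t.count n : Int)) =
      ((pvDD none (PySem.List.sorted L (fun x => x) false)).length : Int) := by
    have := List.sum_toFinset_count_eq_length t
    have hle : (↑(∑ n ∈ t.toFinset, t.count n) : Int) = ((t.length : Nat) : Int) := by
      exact_mod_cast congrArg (Nat.cast : Nat → Int) this
    push_cast at hle
    rw [hle, ht, List.length_map, ← hperm.length_eq]
  -- A's parallel-class sum as the same Finset sum
  have hH : pvHA ((pvDD none (PySem.List.sorted L (fun x => x) false)).map pvKey)
      = ∑ n ∈ t.toFinset, ((t.count n : Int) * ((t.count n : Int) - 1)) := by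
    rw [pvHA_eq_pvH _ hUk_pw, pvH_eq_sum, List.toFinset_eq_of_perm _ _ hpermk]
    exact Finset.sum_congr rfl (fun n _ => by rw [hpermk.count_eq])
  rw [hsum1, hsum2, hM, hH, Prod.mk.injEq]
  refine ⟨rfl, ?_⟩
  have hsplit : ∑ n ∈ t.toFinset, ((t.count n : Int) * ((t.count n : Int) - 1))
      = (∑ n ∈ t.toFinset, ((t.count n : Int) * (t.count n : Int)))
        - ∑ n ∈ t.toFinset, ((t.count n : Int)) := by
    rw [← Finset.sum_sub_distrib]
    exact Finset.sum_congr rfl (fun n _ => by ring)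
  rw [hsplit, hM]
  ring
theorem pvA_glue (points : List (Int × Int)) : calc_M_and_S points = pvA (pvCodes points) := by
  unfold calc_M_and_S pvA pvCodes
  dsimp only
  rw [PySem.List.foldl_congr_mem _ _
    (fun (codes : List Int) (i : Int) => codes ++
      (PySem.List.pyRange (i + 1) (points.length : Int) 1).filterMap (fun j =>
        pvLineCode (PySem.List.pyGetD points i (0, 0)) (PySem.List.pyGetD points j (0, 0))))
    []
    (fun acc i _ => pvFoldOptAppend _ _ acc),
    PySem.List.foldl_append_eq_flatMap]
  rfl

theorem pvB_glue (points : List (Int × Int)) : calc_M_and_S_alt points = pvB (pvCodes points) := by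
  unfold calc_M_and_S_alt pvB pvCodes
  dsimp only
  rw [PySem.List.foldl_congr_mem _ _
    (fun (d : PySem.Dict Int (PySem.Set Int)) (i : Int) =>
      ((PySem.List.pyRange (i + 1) (points.length : Int) 1).filterMap (fun j =>
        pvLineCode (PySem.List.pyGetD points i (0, 0)) (PySem.List.pyGetD points j (0, 0)))).foldl
        (fun (d : PySem.Dict Int (PySem.Set Int)) (c : Int) => PySem.Dict.modify d (c >>> pvDBits) PySem.Set.empty
          (fun s => PySem.Set.add s c)) d)
    PySem.Dict.empty
    (fun d i _ => pvFoldOptStep _ _ _ d),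
    pvFoldlFlatMap]
  rfl

-- ===== VERDICT (by name: the statement is the Claim_ definition above) =====
theorem calc_M_and_S_spec : Claim_equal_calc_M_and_S := by
  unfold Claim_equal_calc_M_and_S
  intro points _
  unfold Spec_calc_M_and_S
  rw [pvA_glue, pvB_glue, pvMain]
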